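-- pv_equiv track=rewrite | github.com/PigInTheSky1234/SAT-based-Automated-Search-for-Differential-linear-Distinguishers-via-Truncated-Differential-Trails | VerifyTDProb.py | genTD2
-- ===== SOURCE A (Python) =====
-- def genTD2(X,n):
--     TD=[]
--     TempX = X
--     MaskX=0
--     Mask2=0
--
--
--     for i in range(n):
--         TD.append(TempX%3)
--         MaskX=MaskX<<1
--         Mask2 = Mask2<<1
--         if (TempX%3)<2:
--             MaskX|=1
--             Mask2|=TempX%3
--
--
--         TempX=TempX//3
--     return TD,MaskX,Mask2
-- ===== SOURCE B (Python) =====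
-- def genTD2(X, n):
--     TD = []
--     t = X
--     for _ in range(n):
--         t, d = divmod(t, 3)
--         TD.append(d)
--     MaskX = sum(1 << i for i, d in enumerate(reversed(TD)) if d < 2)
--     Mask2 = sum(1 << i for i, d in enumerate(reversed(TD)) if d == 1)
--     return TD, MaskX, Mask2
-- ===== Notes on version B (the rewrite author's own statement) =====
-- stated objective: idiomatic
-- what changed: A interleaves digit extraction with MSB-first shift-and-OR mask accumulation in one loop; B first builds the digit list with a divmod loop and then computes each mask separately as a positional sum of 1<<i over enumerate(reversed(TD)).
import Mathlib
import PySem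

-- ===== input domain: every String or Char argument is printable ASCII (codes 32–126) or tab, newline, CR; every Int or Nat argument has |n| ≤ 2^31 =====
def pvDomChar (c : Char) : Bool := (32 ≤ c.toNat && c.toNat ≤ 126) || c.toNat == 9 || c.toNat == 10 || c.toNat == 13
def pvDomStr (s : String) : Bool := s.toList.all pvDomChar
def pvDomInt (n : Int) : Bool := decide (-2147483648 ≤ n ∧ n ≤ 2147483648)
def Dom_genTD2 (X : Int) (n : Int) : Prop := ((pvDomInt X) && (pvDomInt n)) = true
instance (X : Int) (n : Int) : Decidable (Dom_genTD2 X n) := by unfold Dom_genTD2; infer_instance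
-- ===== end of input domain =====

-- B separates digit generation from mask assembly: a divmod loop builds TD, then each mask is a
-- positional sum over enumerate(reversed(TD)) instead of A's interleaved shift-and-OR accumulation
-- (objective: idiomatic; not faster).

-- ===== PORT A =====
-- loop body of A's 'for i in range(n)' (state: TD, TempX, MaskX, Mask2); the index is unused
def genTD2_body (s : List Int × Int × Int × Int) (_i : Int) : List Int × Int × Int × Int :=
  let TD := s.1; let TempX := s.2.1; let MaskX := s.2.2.1; let Mask2 := s.2.2.2
  let TD := TD ++ [PySem.Int.mod TempX 3]
  let MaskX := MaskX <<< (1:Nat)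
  let Mask2 := Mask2 <<< (1:Nat)
  let MaskX := if PySem.Int.mod TempX 3 < 2 then PySem.Int.bor MaskX 1 else MaskX
  let Mask2 := if PySem.Int.mod TempX 3 < 2 then PySem.Int.bor Mask2 (PySem.Int.mod TempX 3) else Mask2
  (TD, PySem.Int.floordiv TempX 3, MaskX, Mask2)

def genTD2 (X : Int) (n : Int) : List Int × Int × Int :=
  let s := (PySem.List.pyRange 0 n 1).foldl genTD2_body ([], X, 0, 0)
  (s.1, s.2.2.1, s.2.2.2)

-- ===== PORT B =====
-- loop body of B's 'for _ in range(n): t, d = divmod(t, 3); TD.append(d)' (divisor is the literal 3 ≠ 0)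
def genTD2_alt_body (s : List Int × Int) (_i : Int) : List Int × Int :=
  (s.1 ++ [PySem.Int.mod s.2 3], PySem.Int.floordiv s.2 3)

-- 'sum(1 << i for i, d in enumerate(reversed(TD)) if d < 2)'; enumerate indices are ≥ 0, so .toNat is exact
def genTD2_alt (X : Int) (n : Int) : List Int × Int × Int :=
  let s := (PySem.List.pyRange 0 n 1).foldl genTD2_alt_body ([], X)
  let TD := s.1
  let MaskX := (PySem.List.enumerate TD.reverse 0).foldl
    (fun (a : Int) (p : Int × Int) => if p.2 < 2 then a + ((1:Int) <<< p.1.toNat) else a) 0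
  let Mask2 := (PySem.List.enumerate TD.reverse 0).foldl
    (fun (a : Int) (p : Int × Int) => if p.2 = 1 then a + ((1:Int) <<< p.1.toNat) else a) 0
  (TD, MaskX, Mask2)

-- ===== PRECONDITION & SPEC =====
def Spec_genTD2 (X : Int) (n : Int) (out : List Int × Int × Int) : Prop := out = genTD2_alt X n
instance (X : Int) (n : Int) (out : List Int × Int × Int) : Decidable (Spec_genTD2 X n out) := by unfold Spec_genTD2; infer_instance

-- ===== CLAIM (what is proved, stated in full; the proofs are below) =====
def Claim_equal_genTD2 : Prop := ∀ (X : Int) (n : Int), Dom_genTD2 X n → Spec_genTD2 X n (genTD2 X n)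

-- ===== LEMMAS AND PROOFS =====

-- iterate a loop body that ignores its index
def pvIter {α : Type} (g : α → α) : Nat → α → α
  | 0, s => s
  | m+1, s => pvIter g m (g s)

theorem pv_foldl_ignore {α : Type} (f : α → Int → α) (g : α → α)
    (h : ∀ s i, f s i = g s) : ∀ (l : List Int) (s : α), l.foldl f s = pvIter g l.length s := by
  intro l
  induction l with
  | nil => intro s; rfl
  | cons x xs ih => intro s; simp [List.foldl, pvIter, h, ih]

-- the base-3 digits produced by m divmod steps, and the final quotient
def pvDigs (t : Int) : Nat → List Int
  | 0 => []
  | m+1 => PySem.Int.mod t 3 :: pvDigs (PySem.Int.floordiv t 3) m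

def pvQuot (t : Int) : Nat → Int
  | 0 => t
  | m+1 => pvQuot (PySem.Int.floordiv t 3) m

def pvStepP (a d : Int) : Int := 2*a + (if d < 2 then 1 else 0)
def pvStepQ (a d : Int) : Int := 2*a + (if d = 1 then 1 else 0)

theorem pv_mod3_bounds (t : Int) : 0 ≤ PySem.Int.mod t 3 ∧ PySem.Int.mod t 3 < 3 := by
  rw [PySem.Int.mod_eq_emod_of_pos (by norm_num)]
  constructor
  · exact Int.emod_nonneg t (by norm_num)
  · exact Int.emod_lt_of_pos t (by norm_num)

theorem pv_nat_two_mul_lor_one (k : Nat) : (2*k) ||| 1 = 2*k+1 := by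
  apply Nat.eq_of_testBit_eq
  intro i
  rw [Nat.testBit_or]
  cases i with
  | zero => simp [Nat.testBit_zero]
  | succ j => simp [Nat.testBit_succ]; congr 1; omega

theorem pv_bor_bit (a d : Int) (ha : 0 ≤ a) (hd0 : 0 ≤ d) (hd1 : d ≤ 1) :
    PySem.Int.bor (2*a) d = 2*a + d := by
  rcases (by omega : d = 0 ∨ d = 1) with h | h
  · simp [h, PySem.Int.bor_zero]
  · subst h
    rw [PySem.Int.bor_of_nonneg (by omega) (by norm_num)]
    have h2 : (2*a).toNat = 2 * a.toNat := by omega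
    rw [h2, show ((1:Int)).toNat = 1 from rfl, pv_nat_two_mul_lor_one]
    omega

-- one A-step equals the arithmetic step on both masks
theorem pv_bodyA_eq (td : List Int) (t mx m2 : Int) (hmx : 0 ≤ mx) (hm2 : 0 ≤ m2) :
    genTD2_body (td, t, mx, m2) 0 =
      (td ++ [PySem.Int.mod t 3], PySem.Int.floordiv t 3,
       pvStepP mx (PySem.Int.mod t 3), pvStepQ m2 (PySem.Int.mod t 3)) := by
  have hb := pv_mod3_bounds t
  have hsh : ∀ a : Int, a <<< (1:Nat) = 2*a := by
    intro a; rw [Int.shiftLeft_eq]; ring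
  rcases (by omega : PySem.Int.mod t 3 = 0 ∨ PySem.Int.mod t 3 = 1 ∨ PySem.Int.mod t 3 = 2)
    with h | h | h <;>
    simp only [genTD2_body, pvStepP, pvStepQ, hsh, h] <;>
    norm_num [pv_bor_bit mx 1 hmx (by norm_num) le_rfl,
      pv_bor_bit m2 0 hm2 le_rfl (by norm_num),
      pv_bor_bit m2 1 hm2 (by norm_num) le_rfl]

theorem pv_stepP_nonneg (a d : Int) (h : 0 ≤ a) : 0 ≤ pvStepP a d := by
  simp only [pvStepP]; split <;> omega
theorem pv_stepQ_nonneg (a d : Int) (h : 0 ≤ a) : 0 ≤ pvStepQ a d := by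
  simp only [pvStepQ]; split <;> omega

theorem pv_iterA_eq : ∀ (m : Nat) (td : List Int) (t mx m2 : Int), 0 ≤ mx → 0 ≤ m2 →
    pvIter (fun s => genTD2_body s 0) m (td, t, mx, m2) =
      (td ++ pvDigs t m, pvQuot t m,
       (pvDigs t m).foldl pvStepP mx, (pvDigs t m).foldl pvStepQ m2) := by
  intro m
  induction m with
  | zero => intro td t mx m2 _ _; simp [pvIter, pvDigs, pvQuot]
  | succ k ih =>
      intro td t mx m2 hmx hm2
      show pvIter _ k (genTD2_body (td, t, mx, m2) 0) = _
      rw [pv_bodyA_eq td t mx m2 hmx hm2,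
          ih _ _ _ _ (pv_stepP_nonneg _ _ hmx) (pv_stepQ_nonneg _ _ hm2)]
      simp [pvDigs, pvQuot]

theorem pv_iterB_eq : ∀ (m : Nat) (td : List Int) (t : Int),
    pvIter (fun s => genTD2_alt_body s 0) m (td, t) = (td ++ pvDigs t m, pvQuot t m) := by
  intro m
  induction m with
  | zero => intro td t; simp [pvIter, pvDigs, pvQuot]
  | succ k ih =>
      intro td t
      show pvIter _ k (genTD2_alt_body (td, t) 0) = _
      rw [show genTD2_alt_body (td, t) 0 = (td ++ [PySem.Int.mod t 3], PySem.Int.floordiv t 3) from rfl, ih]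
      simp [pvDigs, pvQuot]

-- shifting the accumulator out of a 2a+b fold
theorem pv_foldl_shift (B : Int → Int) : ∀ (ds : List Int) (a : Int),
    ds.foldl (fun a d => 2*a + B d) a = a * 2^ds.length + ds.foldl (fun a d => 2*a + B d) 0 := by
  intro ds
  induction ds with
  | nil => intro a; simp
  | cons d rest ih =>
      intro a
      simp only [List.foldl, List.length_cons]
      rw [ih (2*a + B d), ih (2*0 + B d)]
      ring

-- the positional sum over enumerate(reversed ds) is the MSB-first fold over ds
theorem pv_enumfold_eq (p : Int → Prop) [DecidablePred p] : ∀ (ds : List Int),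
    (PySem.List.enumerate ds.reverse 0).foldl
        (fun (a : Int) (q : Int × Int) => if p q.2 then a + ((1:Int) <<< q.1.toNat) else a) 0
      = ds.foldl (fun a d => 2*a + (if p d then 1 else 0)) 0 := by
  intro ds
  induction ds with
  | nil => rfl
  | cons d rest ih =>
      have hsplit : (d :: rest).reverse = rest.reverse ++ [d] := by simp
      rw [hsplit, PySem.List.enumerate_append, List.foldl_append, ih]
      have hlen : ((0 : Int) + (rest.reverse.length : Int)).toNat = rest.length := by simp
      have hstep :
          (PySem.List.enumerate [d] (0 + (rest.reverse.length : Int))).foldl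
              (fun (a : Int) (q : Int × Int) => if p q.2 then a + ((1:Int) <<< q.1.toNat) else a)
              (rest.foldl (fun a d => 2*a + (if p d then 1 else 0)) 0)
            = rest.foldl (fun a d => 2*a + (if p d then 1 else 0)) 0
              + (if p d then (1:Int) <<< rest.length else 0) := by
        simp only [PySem.List.enumerate_cons, PySem.List.enumerate_nil, List.foldl_cons,
          List.foldl_nil, hlen]
        split <;> simp
      rw [hstep]
      have hrhs : (d :: rest).foldl (fun a d => 2*a + (if p d then 1 else 0)) 0
          = (if p d then (1:Int) else 0) * 2^rest.length
            + rest.foldl (fun a d => 2*a + (if p d then 1 else 0)) 0 := by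
        simp only [List.foldl_cons]
        rw [pv_foldl_shift (fun d => if p d then (1:Int) else 0) rest (2*0 + if p d then 1 else 0)]
        ring
      rw [hrhs, Int.shiftLeft_eq]
      split <;> ring

-- ===== VERDICT (by name: the statement is the Claim_ definition above) =====
theorem genTD2_spec : Claim_equal_genTD2 := by
  intro X n _
  unfold Spec_genTD2 genTD2 genTD2_alt
  rw [pv_foldl_ignore genTD2_body (fun s => genTD2_body s 0) (fun s i => rfl),
      pv_foldl_ignore genTD2_alt_body (fun s => genTD2_alt_body s 0) (fun s i => rfl),
      pv_iterA_eq _ _ _ _ _ le_rfl le_rfl, pv_iterB_eq]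
  simp only [List.nil_append, Prod.mk.injEq]
  refine ⟨trivial, ?_, ?_⟩
  · rw [pv_enumfold_eq (fun d => d < 2)]
    rfl
  · rw [pv_enumfold_eq (fun d => d = 1)]
    rfl
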